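-- pv_equiv track=rewrite | github.com/senthilmano81/MyPython | MaximiseSum1.py | getSumArr
-- ===== SOURCE A (Python) =====
-- def getSumArr(arr,inter):
--     sumarr = []
--     i = 0
--     for point in inter:
--         sum = 0
--         while i < len(arr) and arr[i] <= point:
--             sum = sum + arr[i]
--             i = i + 1
--         sumarr.append(sum)
--
--     sum = 0
--     while i < len(arr):
--         sum = sum + arr[i]
--         i = i + 1
--     sumarr.append(sum)
--
--     return sumarr
-- ===== SOURCE B (Python) =====
-- def getSumArr(arr, inter):
--     # One pass over the elements, carrying the current bucket index and its
--     # running sum; interval points are consumed ("flushed") as elements pass them.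
--     n = len(inter)
--     out = []
--     cur = 0
--     b = 0
--     for x in arr:
--         while b < n and x > inter[b]:
--             out.append(cur)
--             cur = 0
--             b += 1
--         cur += x
--     out.append(cur)
--     out.extend([0] * (n - b))
--     return out
-- ===== Notes on version B (the rewrite author's own statement) =====
-- stated objective: alternative
-- what changed: A loops over interval points and drags an element pointer through arr with a Python-level inner while per point; B makes a single element-outer for-pass that carries the current bucket index and running sum, flushing a finished bucket each time an element passes interval points and padding the remaining buckets with zeros at the end.
import Mathlib
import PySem

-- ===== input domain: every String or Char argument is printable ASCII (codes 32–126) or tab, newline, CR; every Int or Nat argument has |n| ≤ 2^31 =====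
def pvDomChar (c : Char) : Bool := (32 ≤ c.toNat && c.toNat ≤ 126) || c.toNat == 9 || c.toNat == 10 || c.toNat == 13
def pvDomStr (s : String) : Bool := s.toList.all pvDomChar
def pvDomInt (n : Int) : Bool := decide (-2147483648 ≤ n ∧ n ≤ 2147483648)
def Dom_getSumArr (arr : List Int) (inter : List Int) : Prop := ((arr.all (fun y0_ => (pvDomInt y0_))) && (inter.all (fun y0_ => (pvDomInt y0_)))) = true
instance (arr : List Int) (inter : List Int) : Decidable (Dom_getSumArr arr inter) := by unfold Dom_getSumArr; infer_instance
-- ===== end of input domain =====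

-- B replaces A's point-outer merge (an outer loop over interval points with a
-- persistent element pointer) by a single element-outer pass that flushes
-- finished buckets as each element passes interval points; objective: alternative.

-- ===== PORT A =====
-- A's inner `while i < len(arr) and arr[i] <= point`, state (sum, i)
def pvWhileA (arr : List Int) (point : Int) (i : Nat) (sum : Int) : Int × Nat :=
  if h : i < arr.length then
    if arr[i] ≤ point then pvWhileA arr point (i + 1) (sum + arr[i]) else (sum, i)
  else (sum, i)
termination_by arr.length - i

-- A's trailing `while i < len(arr)`
def pvWhileTail (arr : List Int) (i : Nat) (sum : Int) : Int :=
  if h : i < arr.length then pvWhileTail arr (i + 1) (sum + arr[i]) else sum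
termination_by arr.length - i

def getSumArr (arr : List Int) (inter : List Int) : List Int :=
  let st := inter.foldl (fun (st : List Int × Nat) point =>
    (st.1 ++ [(pvWhileA arr point st.2 0).1], (pvWhileA arr point st.2 0).2)) ([], 0)
  st.1 ++ [pvWhileTail arr st.2 0]

-- ===== PORT B =====
-- B's inner `while b < n and x > inter[b]`, state (out, cur, b)
def pvFlushB (inter : List Int) (x : Int) (out : List Int) (cur : Int) (b : Nat) :
    List Int × Int × Nat :=
  if h : b < inter.length then
    if inter[b] < x then pvFlushB inter x (out ++ [cur]) 0 (b + 1) else (out, cur, b)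
  else (out, cur, b)
termination_by inter.length - b

def getSumArr_alt (arr : List Int) (inter : List Int) : List Int :=
  let st := arr.foldl (fun (st : List Int × Int × Nat) x =>
    ((pvFlushB inter x st.1 st.2.1 st.2.2).1,
     (pvFlushB inter x st.1 st.2.1 st.2.2).2.1 + x,
     (pvFlushB inter x st.1 st.2.1 st.2.2).2.2)) ([], 0, 0)
  (st.1 ++ [st.2.1]) ++ List.replicate (inter.length - st.2.2) 0

-- ===== PRECONDITION & SPEC =====
def Spec_getSumArr (arr : List Int) (inter : List Int) (out : List Int) : Prop := out = getSumArr_alt arr inter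
instance (arr : List Int) (inter : List Int) (out : List Int) : Decidable (Spec_getSumArr arr inter out) := by unfold Spec_getSumArr; infer_instance

-- ===== CLAIM (what is proved, stated in full; the proofs are below) =====
def Claim_equal_getSumArr : Prop := ∀ (arr : List Int) (inter : List Int), Dom_getSumArr arr inter → Spec_getSumArr arr inter (getSumArr arr inter)

-- ===== LEMMAS AND PROOFS =====

def sumL : List Int → Int
  | [] => 0
  | x :: xs => x + sumL xs

-- common reference function: bucket sums of l under the points ps
def Aview : List Int → List Int → List Int
  | l, [] => [sumL l]
  | l, p :: ps => sumL (l.takeWhile (· ≤ p)) :: Aview (l.dropWhile (· ≤ p)) ps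

def headAdd (c : Int) : List Int → List Int
  | [] => []
  | x :: xs => (c + x) :: xs

theorem headAdd_zero_Aview (l ps : List Int) : headAdd 0 (Aview l ps) = Aview l ps := by
  cases ps <;> simp [Aview, headAdd]

theorem Aview_nil (ps : List Int) : Aview [] ps = List.replicate (ps.length + 1) 0 := by
  induction ps with
  | nil => simp [Aview, sumL]
  | cons p ps ih => simp [Aview, sumL, ih, List.replicate_succ]

theorem drop_cons_facts (arr : List Int) (i : Nat) (x : Int) (l : List Int)
    (h : arr.drop i = x :: l) :
    ∃ (hi : i < arr.length), arr[i] = x ∧ arr.drop (i + 1) = l := by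
  have hi : i < arr.length := by
    rcases Nat.lt_or_ge i arr.length with hlt | hge
    · exact hlt
    · rw [List.drop_eq_nil_of_le hge] at h; simp at h
  refine ⟨hi, ?_, ?_⟩
  · have h1 : (arr.drop i).head? = some x := by rw [h]; rfl
    rw [List.head?_drop] at h1
    exact Option.some.inj ((List.getElem?_eq_getElem hi).symm.trans h1)
  · have h2 : (arr.drop i).tail = l := by rw [h]; rfl
    rw [List.tail_drop] at h2
    exact h2

theorem pvWhileA_eq (p : Int) (l : List Int) : ∀ (arr : List Int) (i : Nat) (s : Int),
    arr.drop i = l →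
    pvWhileA arr p i s = (s + sumL (l.takeWhile (· ≤ p)), i + (l.takeWhile (· ≤ p)).length) := by
  induction l with
  | nil =>
    intro arr i s h
    have hge : arr.length ≤ i := List.drop_eq_nil_iff.mp h
    rw [pvWhileA]
    simp [List.takeWhile, sumL, Nat.not_lt.mpr hge]
  | cons x l ih =>
    intro arr i s h
    obtain ⟨hi, hxe, hd⟩ := drop_cons_facts arr i x l h
    rw [pvWhileA]
    by_cases hp : x ≤ p
    · simp only [hi, dif_pos, hxe, if_pos hp]
      rw [ih arr (i + 1) (s + x) hd]
      simp [hp, sumL]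
      constructor
      · ring
      · omega
    · simp [hi, hxe, hp, sumL]

theorem pvWhileTail_eq (l : List Int) : ∀ (arr : List Int) (i : Nat) (s : Int),
    arr.drop i = l → pvWhileTail arr i s = s + sumL l := by
  induction l with
  | nil =>
    intro arr i s h
    have hge : arr.length ≤ i := List.drop_eq_nil_iff.mp h
    rw [pvWhileTail]
    simp [sumL, Nat.not_lt.mpr hge]
  | cons x l ih =>
    intro arr i s h
    obtain ⟨hi, hxe, hd⟩ := drop_cons_facts arr i x l h
    rw [pvWhileTail]
    simp only [hi, dif_pos, hxe]
    rw [ih arr (i + 1) (s + x) hd, sumL]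
    ring

theorem dropWhile_drop (arr : List Int) (i : Nat) (p : Int) :
    arr.drop (i + ((arr.drop i).takeWhile (· ≤ p)).length) = (arr.drop i).dropWhile (· ≤ p) := by
  rw [← List.drop_drop]
  calc (arr.drop i).drop (((arr.drop i).takeWhile (· ≤ p)).length)
      = (((arr.drop i).takeWhile (· ≤ p)) ++ ((arr.drop i).dropWhile (· ≤ p))).drop
          (((arr.drop i).takeWhile (· ≤ p)).length) := by rw [List.takeWhile_append_dropWhile]
    _ = (arr.drop i).dropWhile (· ≤ p) := List.drop_left

theorem A_run (inter : List Int) (arr : List Int) :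
    ∀ (i : Nat) (acc : List Int),
    (inter.foldl (fun (st : List Int × Nat) point =>
        (st.1 ++ [(pvWhileA arr point st.2 0).1], (pvWhileA arr point st.2 0).2)) (acc, i)).1
      ++ [pvWhileTail arr
            (inter.foldl (fun (st : List Int × Nat) point =>
              (st.1 ++ [(pvWhileA arr point st.2 0).1],
               (pvWhileA arr point st.2 0).2)) (acc, i)).2 0]
      = acc ++ Aview (arr.drop i) inter := by
  induction inter with
  | nil =>
    intro i acc
    simp [Aview, pvWhileTail_eq (arr.drop i) arr i 0 rfl]
  | cons p ps ih =>
    intro i acc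
    have hw := pvWhileA_eq p (arr.drop i) arr i 0 rfl
    simp only [List.foldl_cons, hw]
    rw [ih (i + ((arr.drop i).takeWhile (· ≤ p)).length)
        (acc ++ [0 + sumL ((arr.drop i).takeWhile (· ≤ p))])]
    rw [dropWhile_drop]
    simp [Aview]

theorem flush_then (inter : List Int) (x : Int) (xs : List Int) :
    ∀ (k : Nat) (b : Nat), inter.length - b ≤ k → ∀ (out : List Int) (cur : Int),
    (pvFlushB inter x out cur b).1
      ++ headAdd ((pvFlushB inter x out cur b).2.1 + x)
           (Aview xs (inter.drop (pvFlushB inter x out cur b).2.2))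
      = out ++ headAdd cur (Aview (x :: xs) (inter.drop b)) := by
  intro k
  induction k with
  | zero =>
    intro b hb out cur
    have hge : inter.length ≤ b := by omega
    rw [pvFlushB]
    simp only [Nat.not_lt.mpr hge, dif_neg, not_false_iff]
    rw [List.drop_eq_nil_of_le hge]
    simp [Aview, headAdd, sumL]
    ring
  | succ k ih =>
    intro b hb out cur
    by_cases hlt : b < inter.length
    · have hdrop : inter.drop b = inter[b] :: inter.drop (b + 1) :=
        List.drop_eq_getElem_cons hlt
      by_cases hx : inter[b] < x
      · rw [pvFlushB]
        simp only [hlt, dif_pos, if_pos hx]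
        rw [ih (b + 1) (by omega) (out ++ [cur]) 0]
        rw [hdrop, headAdd_zero_Aview]
        have hnle : ¬ (x ≤ inter[b]) := by omega
        simp [Aview, hnle, sumL, headAdd]
      · rw [pvFlushB]
        simp only [hlt, dif_pos, if_neg hx]
        rw [hdrop]
        have hle : x ≤ inter[b] := by omega
        simp [Aview, hle, sumL, headAdd]
        ring
    · have hge : inter.length ≤ b := by omega
      rw [pvFlushB]
      simp only [hlt, dif_neg, not_false_iff]
      rw [List.drop_eq_nil_of_le hge]
      simp [Aview, headAdd, sumL]
      ring

theorem B_run (inter : List Int) :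
    ∀ (xs : List Int) (out : List Int) (cur : Int) (b : Nat),
    ((xs.foldl (fun (st : List Int × Int × Nat) x =>
        ((pvFlushB inter x st.1 st.2.1 st.2.2).1,
         (pvFlushB inter x st.1 st.2.1 st.2.2).2.1 + x,
         (pvFlushB inter x st.1 st.2.1 st.2.2).2.2)) (out, cur, b)).1
      ++ [(xs.foldl (fun (st : List Int × Int × Nat) x =>
        ((pvFlushB inter x st.1 st.2.1 st.2.2).1,
         (pvFlushB inter x st.1 st.2.1 st.2.2).2.1 + x,
         (pvFlushB inter x st.1 st.2.1 st.2.2).2.2)) (out, cur, b)).2.1])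
      ++ List.replicate (inter.length -
          (xs.foldl (fun (st : List Int × Int × Nat) x =>
            ((pvFlushB inter x st.1 st.2.1 st.2.2).1,
             (pvFlushB inter x st.1 st.2.1 st.2.2).2.1 + x,
             (pvFlushB inter x st.1 st.2.1 st.2.2).2.2)) (out, cur, b)).2.2) 0
      = out ++ headAdd cur (Aview xs (inter.drop b)) := by
  intro xs
  induction xs with
  | nil =>
    intro out cur b
    simp only [List.foldl_nil]
    rw [Aview_nil, List.length_drop, List.replicate_succ]
    simp [headAdd]
  | cons x xs ih =>
    intro out cur b
    simp only [List.foldl_cons]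
    rw [ih]
    exact flush_then inter x xs (inter.length - b) b (Nat.le_refl _) out cur

-- ===== VERDICT (by name: the statement is the Claim_ definition above) =====
theorem getSumArr_spec : Claim_equal_getSumArr := by
  intro arr inter _
  unfold Spec_getSumArr getSumArr getSumArr_alt
  rw [A_run inter arr 0 [], B_run inter arr [] 0 0]
  simp [headAdd_zero_Aview]
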